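-- pv_equiv track=rewrite | github.com/icemanjr/Hamming | hamming.py | redundBitPos
-- ===== SOURCE A (Python) =====
-- def redundBitPos(data, r):
--     # Calculates the position of parity bits, and inserts 0's in their positions
--     j = 0
--     k = 1
--     m = len(data)
--     result = ''
--
--     for i in range(1, m + r + 1):
--         if i == 2**j:
--             result = result + '0'
--             j += 1
--         else:
--             result = result + data[-k]
--             k += 1
--
--     return result[::-1]
-- ===== SOURCE B (Python) =====
-- def redundBitPos(data, r):
--     # Chunk-based: emit whole slices of data between parity positions and join
--     # the O(log n) pieces in reverse, instead of per-character work.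
--     n = len(data) + r
--     m = len(data)
--     pieces = []
--     k = 0          # tail characters of data consumed so far
--     prev = 0       # last parity position handled
--     p = 1
--     while p <= n:
--         gap = p - prev - 1           # non-parity positions between prev and p
--         if gap:
--             pieces.append(data[m - k - gap:m - k])
--             k += gap
--         pieces.append('0')
--         prev = p
--         p *= 2
--     gap = n - prev                   # non-parity positions after the last power
--     if gap > 0:
--         pieces.append(data[m - k - gap:m - k])
--         k += gap
--     return ''.join(reversed(pieces))
-- ===== Notes on version B (the rewrite author's own statement) =====
-- stated objective: faster
-- what changed: Replaces A's per-position loop (one power-of-two test and one one-character string concatenation per position) by a chunk algorithm that walks only the O(log n) parity positions, emits each stretch of data between consecutive parity positions as a single slice, and joins the pieces in reverse order.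
import Mathlib
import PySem

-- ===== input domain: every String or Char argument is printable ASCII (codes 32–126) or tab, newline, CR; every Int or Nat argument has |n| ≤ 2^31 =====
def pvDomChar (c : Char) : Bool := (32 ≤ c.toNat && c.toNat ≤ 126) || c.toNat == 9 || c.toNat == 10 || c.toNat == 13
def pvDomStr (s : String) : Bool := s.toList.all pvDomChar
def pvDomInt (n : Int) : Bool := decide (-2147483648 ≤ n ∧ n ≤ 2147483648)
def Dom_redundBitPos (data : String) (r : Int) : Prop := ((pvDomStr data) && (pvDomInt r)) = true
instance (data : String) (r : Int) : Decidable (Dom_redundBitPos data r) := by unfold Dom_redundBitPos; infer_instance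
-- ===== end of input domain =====

-- B replaces A's per-position loop (one power test and one one-character append per
-- position) by a chunk algorithm: it walks only the O(log n) parity positions, emits
-- each stretch of data between two parity positions as ONE slice, and joins the
-- pieces in reverse (objective: faster — A's repeated string concatenation is
-- quadratic in CPython, B does O(log n) slices and one join).

-- ===== PORT A =====
-- A's loop state is (j, k, result); result is kept as a List Char accumulated in order,
-- data[-k] is PySem.Str.pyGet? (none = IndexError, threaded through the Option),
-- and the final result[::-1] is List.reverse (PySem.List.slice?_none_none_neg_one).
def stepA (data : String) (st : Nat × Nat × Option (List Char)) (i : Int) : Nat × Nat × Option (List Char) :=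
  match st with
  | (j, k, acc) =>
    if i = (2 : Int) ^ j then
      (j + 1, k, acc.map (fun l => l ++ ['0']))
    else
      (j, k + 1, acc.bind (fun l => (PySem.Str.pyGet? data (-(k : Int))).map (fun ch => l ++ [ch])))

def redundBitPos (data : String) (r : Int) : String :=
  let m : Int := PySem.Str.len data
  let res := (PySem.List.pyRange 1 (m + r + 1) 1).foldl (stepA data) (0, 1, some [])
  match res.2.2 with
  | some l => String.ofList l.reverse
  | none => ""   -- unreachable under Pre_ (Python raises IndexError there)

-- ===== PORT B =====
-- the while loop: state (p, prev, k, pieces); the '1 ≤ p' conjunct only makes the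
-- recursion total (p, starting at 1 and doubling, always satisfies it)
def loopB (data : String) (n m p prev k : Int) (pieces : List String) : List String × Int × Int :=
  if 1 ≤ p ∧ p ≤ n then
    let gap := p - prev - 1
    let pk := if gap ≠ 0 then
        (pieces ++ [PySem.Str.slice data (some (m - k - gap)) (some (m - k))], k + gap)
      else (pieces, k)
    loopB data n m (p * 2) p pk.2 (pk.1 ++ ["0"])
  else (pieces, k, prev)
termination_by (n + 1 - p).toNat
decreasing_by omega

-- the code after the loop: the final gap, then ''.join(reversed(pieces))
def finishB (data : String) (n m : Int) (st : List String × Int × Int) : String :=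
  let gap := n - st.2.2
  let pieces := if 0 < gap then
      st.1 ++ [PySem.Str.slice data (some (m - st.2.1 - gap)) (some (m - st.2.1))]
    else st.1
  PySem.Str.join "" pieces.reverse

def redundBitPos_alt (data : String) (r : Int) : String :=
  let n : Int := PySem.Str.len data + r
  let m : Int := PySem.Str.len data
  finishB data n m (loopB data n m 1 0 0 [])

-- ===== PRECONDITION & SPEC =====
-- number of powers of two ≤ x
def numPow (x : Nat) : Nat := if x = 0 then 0 else Nat.log 2 x + 1

-- Pre_ excludes exactly the inputs where A raises IndexError: the non-parity positions
-- among 1..len(data)+r must not outnumber the characters of data (data[-k] with k too large).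
def Pre_redundBitPos (data : String) (r : Int) : Prop :=
  (PySem.Str.len data + r).toNat - numPow (PySem.Str.len data + r).toNat ≤ data.toList.length
instance (data : String) (r : Int) : Decidable (Pre_redundBitPos data r) := by
  unfold Pre_redundBitPos; infer_instance

def pvWitness_redundBitPos : String × Int := ("1011", 3)

def Spec_redundBitPos (data : String) (r : Int) (out : String) : Prop := out = redundBitPos_alt data r
instance (data : String) (r : Int) (out : String) : Decidable (Spec_redundBitPos data r out) := by unfold Spec_redundBitPos; infer_instance

-- ===== CLAIM (what is proved, stated in full; the proofs are below) =====
def Claim_equal_redundBitPos : Prop := ∀ (data : String) (r : Int), Dom_redundBitPos data r → Pre_redundBitPos data r → Spec_redundBitPos data r (redundBitPos data r)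

-- ===== LEMMAS AND PROOFS =====

-- characterisation of A's loop: positions i, i+1, …, i+c-1 with counters j (next power
-- exponent) and k (next tail index), produced front to back
def specF (data : String) : Nat → Nat → Nat → Nat → Option (List Char)
  | 0, _, _, _ => some []
  | c + 1, j, k, i =>
    if i = 2 ^ j then (specF data c (j + 1) k (i + 1)).map (fun l => '0' :: l)
    else
      match PySem.List.pyGet? data.toList (-(k : Int)) with
      | none => none
      | some ch => (specF data c j (k + 1) (i + 1)).map (fun l => ch :: l)

theorem foldlA_none (data : String) (L : List Int) :
    ∀ (j k : Nat), (L.foldl (stepA data) (j, k, (none : Option (List Char)))).2.2 = none := by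
  induction L with
  | nil => intro j k; rfl
  | cons i L ih =>
      intro j k
      by_cases h : i = (2 : Int) ^ j <;> simp [List.foldl, stepA, h, ih]

theorem foldlA_spec (data : String) :
    ∀ (c i j k : Nat) (acc : List Char),
      ((PySem.List.pyRange (i : Int) ((i : Int) + (c : Int)) 1).foldl (stepA data)
          (j, k, some acc)).2.2
        = (specF data c j k i).map (fun l => acc ++ l) := by
  intro c
  induction c with
  | zero =>
      intro i j k acc
      rw [PySem.List.pyRange_one_eq_nil (by simp)]
      simp [specF]
  | succ c ih =>
      intro i j k acc
      rw [PySem.List.pyRange_one_cons (by push_cast; omega)]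
      have hrest : (i : Int) + ((c : Nat) + 1 : Nat) = ((i + 1 : Nat) : Int) + (c : Int) := by
        push_cast; ring
      have hstart : ((i : Int) + 1) = ((i + 1 : Nat) : Int) := by push_cast; ring
      by_cases hij : i = 2 ^ j
      · have hij' : (i : Int) = (2 : Int) ^ j := by rw [hij]; push_cast; ring
        simp only [List.foldl, stepA, if_pos hij', hrest, hstart, Option.map]
        rw [ih (i + 1) (j + 1) k (acc ++ ['0'])]
        simp only [specF, if_pos hij]
        cases specF data c (j + 1) k (i + 1) <;> simp
      · have hij' : ¬ (i : Int) = (2 : Int) ^ j := by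
          intro h; apply hij
          have : (i : Int) = ((2 ^ j : Nat) : Int) := by push_cast; exact h
          exact_mod_cast this
        simp only [List.foldl, stepA, if_neg hij', hrest, hstart]
        cases hget : PySem.List.pyGet? data.toList (-(k : Int)) with
        | none =>
            have hgetC : PySem.Chars.pyGet? data.toList (-(k : Int)) = none := hget
            simp only [PySem.Str.pyGet?, hgetC, Option.map, Option.bind]
            rw [foldlA_none]
            simp [specF, if_neg hij, hget]
        | some ch =>
            have hgetC : PySem.Chars.pyGet? data.toList (-(k : Int)) = some ch := hget
            simp only [PySem.Str.pyGet?, hgetC, Option.map, Option.bind]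
            rw [ih (i + 1) j (k + 1) (acc ++ [ch])]
            simp only [specF, if_neg hij, hget]
            cases specF data c j (k + 1) (i + 1) <;> simp

-- the characters data[-k], data[-(k+1)], …, data[-(k+g-1)] (front to back)
def tailChars (data : String) : Nat → Nat → Option (List Char)
  | _, 0 => some []
  | k, g + 1 =>
      (PySem.List.pyGet? data.toList (-(k : Int))).bind fun ch =>
        (tailChars data (k + 1) g).map (ch :: ·)

-- a run of g positions none of which is the pending power 2^j
theorem specF_run (data : String) :
    ∀ (g c i j k : Nat), (∀ t, t < g → i + t ≠ 2 ^ j) →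
      specF data (g + c) j k i
        = (tailChars data k g).bind fun pre =>
            (specF data c j (k + g) (i + g)).map (pre ++ ·) := by
  intro g
  induction g with
  | zero =>
      intro c i j k _
      simp [tailChars]
  | succ g ih =>
      intro c i j k hnp
      have hne : i ≠ 2 ^ j := by simpa using hnp 0 (by omega)
      have hstep : g + 1 + c = (g + c) + 1 := by omega
      rw [hstep]
      simp only [specF, if_neg hne]
      cases hget : PySem.List.pyGet? data.toList (-(k : Int)) with
      | none => simp [tailChars, hget]
      | some ch =>
          rw [ih c (i + 1) j (k + 1) (by intro t ht; have := hnp (t + 1) (by omega); omega)]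
          simp only [tailChars, hget, Option.bind, Option.map]
          cases htail : tailChars data (k + 1) g with
          | none => simp
          | some pre =>
              have h1 : i + 1 + g = i + (g + 1) := by omega
              have h2 : k + 1 + g = k + (g + 1) := by omega
              rw [h1, h2]
              cases specF data c j (k + (g + 1)) (i + (g + 1)) <;> simp

-- a successful g ≥ 1 run implies the deepest index is in range
theorem tailChars_le (data : String) :
    ∀ (g k : Nat) (cs : List Char), 1 ≤ g → tailChars data k g = some cs →
      k + g ≤ data.toList.length + 1 := by
  intro g
  induction g with
  | zero => intro k cs h; omega
  | succ g ih =>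
      intro k cs _ h
      cases hget : PySem.List.pyGet? data.toList (-(k : Int)) with
      | none => simp [tailChars, hget] at h
      | some ch =>
          have hk : k ≤ data.toList.length := by
            by_contra hc
            have : ¬ PySem.Raise.InRange data.toList.length (-(k : Int)) := by
              have hlen : data.toList.length = data.length := by simp
              simp [PySem.Raise.InRange]; omega
            rw [← PySem.List.pyGet?_eq_none_iff] at this
            simp [this] at hget
          rcases Nat.eq_zero_or_pos g with hg | hg
          · subst hg; omega
          · simp only [tailChars, hget, Option.bind] at h
            cases htail : tailChars data (k + 1) g with
            | none => simp [htail] at h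
            | some cs' => have := ih (k + 1) cs' hg htail; omega

-- the value of a successful run, as a reversed slice of data
theorem tailChars_val (data : String) :
    ∀ (g k : Nat), k + g ≤ data.toList.length →
      tailChars data (k + 1) g
        = some (((data.toList.drop (data.toList.length - k - g)).take g).reverse) := by
  intro g
  induction g with
  | zero => intro k _; simp [tailChars]
  | succ g ih =>
      intro k h
      have hget : PySem.List.pyGet? data.toList (-((k + 1 : Nat) : Int))
          = data.toList[data.toList.length - (k + 1)]? :=
        PySem.List.pyGet?_neg_natCast _ _ (by omega) (by omega)
      have hlt : data.toList.length - (k + 1) < data.toList.length := by omega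
      simp only [tailChars, hget, List.getElem?_eq_getElem hlt, Option.bind, Option.map]
      rw [ih (k + 1) (by omega)]
      have hL : (data.toList.drop (data.toList.length - k - (g + 1))).take (g + 1)
          = (data.toList.drop (data.toList.length - (k + 1) - g)).take g
            ++ [data.toList[data.toList.length - (k + 1)]] := by
        have hidx : data.toList.length - k - (g + 1) = data.toList.length - (k + 1) - g := by
          omega
        rw [hidx, List.take_add_one]
        congr 1
        have hlen : data.toList.length = data.length := by simp
        have hglt : g < (data.toList.drop (data.toList.length - (k + 1) - g)).length := by
          simp; omega
        rw [List.getElem?_eq_getElem hglt, List.getElem_drop]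
        have hix : data.length - (k + 1) - g + g = data.length - (k + 1) := by omega
        simp [hix]
      rw [hL]
      simp

-- the chunk slice B appends has exactly the reversed run characters
theorem slice_chunk (data : String) (k g : Nat) (h : k + g ≤ data.toList.length) :
    (PySem.Str.slice data (some ((data.toList.length : Int) - (k : Int) - (g : Int)))
        (some ((data.toList.length : Int) - (k : Int)))).toList
      = (data.toList.drop (data.toList.length - k - g)).take g := by
  have h1 : (data.toList.length : Int) - (k : Int) - (g : Int)
      = ((data.toList.length - k - g : Nat) : Int) := by omega
  have h2 : (data.toList.length : Int) - (k : Int)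
      = ((data.toList.length - k : Nat) : Int) := by omega
  rw [h1, h2]
  have := PySem.Str.toList_slice data (some ((data.toList.length - k - g : Nat) : Int))
      (some ((data.toList.length - k : Nat) : Int))
  rw [this, PySem.Chars.slice_eq_listSlice, PySem.List.slice_natCast]
  congr 1
  omega

theorem join_nil_flatten : ∀ (l : List (List Char)), PySem.Chars.join [] l = l.flatten := by
  intro l
  induction l with
  | nil => simp [PySem.Chars.join_nil]
  | cons p rest ih =>
      cases rest with
      | nil => simp [PySem.Chars.join_singleton]
      | cons q rest' => rw [PySem.Chars.join_cons_cons]; simp_all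

theorem finishB_toList (data : String) (n m : Int) (st : List String × Int × Int) :
    (finishB data n m st).toList
      = (((if 0 < n - st.2.2 then
            st.1 ++ [PySem.Str.slice data (some (m - st.2.1 - (n - st.2.2))) (some (m - st.2.1))]
          else st.1).reverse).map String.toList).flatten := by
  unfold finishB
  rw [PySem.Str.toList_join, show "".toList = ([] : List Char) from rfl, join_nil_flatten]

-- the main loop invariant: from state (p = 2^j, prev = 2^(j-1), k consumed), the rest of
-- B's computation produces exactly the reverse of A's remaining characters, in front of
-- the pieces already collected

-- 2^j grows at least linearly
theorem pow_ge_add (j d : Nat) : 2 ^ j + d ≤ 2 ^ (j + d) := by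
  induction d with
  | zero => simp
  | succ d ih =>
      have h1 : 1 ≤ (2:Nat) ^ (j + d) := Nat.one_le_two_pow
      have h2 : (2:Nat) ^ (j + (d + 1)) = 2 * 2 ^ (j + d) := by
        rw [show j + (d + 1) = (j + d) + 1 from rfl, pow_succ]; ring
      omega

-- under Pre_'s budget every data[-k] access of A is in range
theorem specF_isSome (data : String) :
    ∀ (c j k i : Nat), 1 ≤ i → i ≤ 2 ^ j → 2 ^ j < 2 * i → 1 ≤ k →
      k - 1 + c ≤ data.toList.length + (numPow (i + c - 1) - j) →
      (specF data c j k i).isSome := by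
  intro c
  induction c with
  | zero => intro j k i _ _ _ _ _; simp [specF]
  | succ c ih =>
      intro j k i h1 h2 h3 hk hbound
      by_cases hij : i = 2 ^ j
      · have hN : j + 1 ≤ numPow (i + c) := by
          unfold numPow
          rw [if_neg (by omega)]
          have hmono := Nat.log_mono_right (b := 2) (show 2 ^ j ≤ i + c by omega)
          rw [Nat.log_pow (by norm_num)] at hmono
          omega
        have hpow1 : 1 ≤ (2:Nat) ^ j := Nat.one_le_two_pow
        have hIH := ih (j + 1) k (i + 1) (by omega)
          (by rw [pow_succ]; omega) (by rw [pow_succ]; omega) hk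
          (by
            have harg : i + 1 + c - 1 = i + (c + 1) - 1 := by omega
            rw [harg]
            omega)
        simp only [specF, if_pos hij]
        cases hs : specF data c (j + 1) k (i + 1) with
        | none => rw [hs] at hIH; simp at hIH
        | some _ => simp
      · have hiltpow : i < 2 ^ j := by omega
        have hcount : numPow (i + (c + 1) - 1) - j ≤ c := by
          by_cases hbig : 2 ^ j ≤ i + c
          · have hL := Nat.log_mono_right (b := 2) hbig
            rw [Nat.log_pow (by norm_num)] at hL
            have hLle : 2 ^ Nat.log 2 (i + c) ≤ i + c :=
              Nat.pow_log_le_self 2 (by omega)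
            have hgrow := pow_ge_add j (Nat.log 2 (i + c) - j)
            rw [show j + (Nat.log 2 (i + c) - j) = Nat.log 2 (i + c) by omega] at hgrow
            unfold numPow
            rw [if_neg (by omega)]
            have harg : i + (c + 1) - 1 = i + c := by omega
            rw [harg]
            omega
          · have : numPow (i + c) ≤ j := by
              unfold numPow
              split
              · omega
              · have := Nat.log_lt_of_lt_pow (b := 2) (x := j) (y := i + c) (by omega) (by omega)
                omega
            have harg : i + (c + 1) - 1 = i + c := by omega
            rw [harg]
            omega
        have hkm : k ≤ data.toList.length := by omega
        have hget : PySem.List.pyGet? data.toList (-(k : Int))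
            = data.toList[data.toList.length - k]? :=
          PySem.List.pyGet?_neg_natCast _ _ (by omega) hkm
        have hlt : data.toList.length - k < data.toList.length := by omega
        have hIH := ih j (k + 1) (i + 1) (by omega) (by omega) (by omega) (by omega)
          (by
            have harg : i + 1 + c - 1 = i + (c + 1) - 1 := by omega
            rw [harg]
            omega)
        simp only [specF, if_neg hij, hget, List.getElem?_eq_getElem hlt]
        cases hs : specF data c j (k + 1) (i + 1) with
        | none => rw [hs] at hIH; simp at hIH
        | some _ => simp

theorem loopB_spec (data : String) (n : Int) :
    ∀ (c j k : Nat) (pieces : List String) (l : List Char),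
      1 ≤ j → (2 : Int) ^ (j - 1) ≤ n → c = (n - 2 ^ (j - 1)).toNat →
      specF data c j (k + 1) (2 ^ (j - 1) + 1) = some l →
      (finishB data n (data.toList.length : Int)
          (loopB data n (data.toList.length : Int) (2 ^ j) (2 ^ (j - 1)) (k : Int) pieces)).toList
        = l.reverse ++ ((pieces.reverse).map String.toList).flatten := by
  intro c
  induction c using Nat.strong_induction_on with
  | _ c ih =>
    intro j k pieces l hj hple hc hspec
    have hjj : j - 1 + 1 = j := by omega
    have h2jI : (2 : Int) ^ j = 2 * 2 ^ (j - 1) := by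
      conv_lhs => rw [← hjj]
      rw [pow_succ]; ring
    have h2jN : (2 : Nat) ^ j = 2 * 2 ^ (j - 1) := by
      conv_lhs => rw [← hjj]
      rw [pow_succ]; ring
    have hP1 : 1 ≤ (2:Nat) ^ (j - 1) := Nat.one_le_two_pow
    have hcastP : ((2 ^ (j - 1) : Nat) : Int) = (2 : Int) ^ (j - 1) := by push_cast; ring
    have hcastQ : ((2 ^ j : Nat) : Int) = (2 : Int) ^ j := by push_cast; ring
    have hposI : (0 : Int) < 2 ^ (j - 1) := by positivity
    have hcInt : (c : Int) = n - 2 ^ (j - 1) := by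
      rw [hc, Int.toNat_of_nonneg (by omega)]
    by_cases hcase : (2 : Int) ^ j ≤ n
    · -- the loop runs once more
      rw [loopB, if_pos ⟨by omega, hcase⟩]
      simp only []
      have hgapval : (2 : Int) ^ j - 2 ^ (j - 1) - 1 = ((2 ^ (j - 1) - 1 : Nat) : Int) := by
        push_cast [Nat.cast_sub hP1]
        omega
      rw [hgapval]
      set g : Nat := 2 ^ (j - 1) - 1 with hg
      have hcge : g + 1 ≤ c := by omega
      -- split A's remaining run: g non-parity positions, the parity position 2^j, the rest
      have hrun := specF_run data g (c - g) (2 ^ (j - 1) + 1) j (k + 1)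
        (by intro t ht; omega)
      rw [show g + (c - g) = c by omega] at hrun
      rw [hrun] at hspec
      cases htail : tailChars data (k + 1) g with
      | none => rw [htail] at hspec; simp at hspec
      | some cs =>
        rw [htail] at hspec
        simp only [Option.bind] at hspec
        cases hrest : specF data (c - g) j (k + 1 + g) (2 ^ (j - 1) + 1 + g) with
        | none => rw [hrest] at hspec; simp at hspec
        | some rest =>
          rw [hrest] at hspec
          simp only [Option.map] at hspec
          have hl : l = cs ++ rest := by injection hspec with h; exact h.symm
          have hi2 : 2 ^ (j - 1) + 1 + g = 2 ^ j := by omega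
          rw [hi2, show c - g = (c - g - 1) + 1 by omega] at hrest
          simp only [specF] at hrest
          cases hrest' : specF data (c - g - 1) (j + 1) (k + 1 + g) (2 ^ j + 1) with
          | none => rw [hrest'] at hrest; simp at hrest
          | some rest' =>
            rw [hrest'] at hrest
            simp only [Option.map] at hrest
            have hrest0 : rest = '0' :: rest' := by injection hrest with h; exact h.symm
            have hIH := ih (c - g - 1) (by omega) (j + 1) (k + g)
              ((if ((g : Int) ≠ 0) then
                  (pieces ++ [PySem.Str.slice data
                      (some ((data.toList.length : Int) - (k : Int) - (g : Int)))
                      (some ((data.toList.length : Int) - (k : Int)))], (k : Int) + g)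
                else (pieces, (k : Int))).1 ++ ["0"]) rest'
              (by omega)
              (by simp only [Nat.add_sub_cancel]; omega)
              (by simp only [Nat.add_sub_cancel]; omega)
              (by simp only [Nat.add_sub_cancel]
                  rw [show k + g + 1 = k + 1 + g by omega]
                  exact hrest')
            simp only [Nat.add_sub_cancel] at hIH
            by_cases hg0 : g = 0
            · -- no characters between the two parity positions (j = 1)
              have hcs : cs = [] := by
                rw [hg0] at htail
                simp only [tailChars] at htail
                exact (Option.some.inj htail).symm
              rw [if_neg (by simp [hg0])]
              rw [if_neg (by simp [hg0])] at hIH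
              rw [show ((2:Int) ^ (j + 1)) = 2 ^ j * 2 from by ring,
                  show ((k + g : Nat) : Int) = (k : Int) from by simp [hg0]] at hIH
              rw [hl, hrest0, hcs]
              have h0 : "0".toList = ['0'] := by decide
              simpa [h0] using hIH
            · -- a real chunk: its slice holds exactly the reversed run characters
              have hkg : k + g ≤ data.toList.length := by
                have := tailChars_le data g (k + 1) cs (by omega) htail
                omega
              have hcsval : cs = ((data.toList.drop (data.toList.length - k - g)).take g).reverse := by
                have hv := tailChars_val data g k hkg
                rw [htail] at hv
                exact Option.some.inj hv
              rw [if_pos (by simpa using hg0)]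
              rw [if_pos (by simpa using hg0)] at hIH
              rw [show ((2:Int) ^ (j + 1)) = 2 ^ j * 2 from by ring,
                  show ((k + g : Nat) : Int) = (k : Int) + (g : Int) from by push_cast; ring] at hIH
              have hchunk := slice_chunk data k g hkg
              simp at hchunk
              rw [hl, hrest0, hcsval]
              have h0 : "0".toList = ['0'] := by decide
              simpa [h0, hchunk] using hIH
    · -- the loop stops: only the final tail chunk (if any) is left
      rw [loopB, if_neg (by intro h; exact hcase h.2)]
      rw [finishB_toList]
      by_cases hc0 : c = 0
      · rw [if_neg (by show ¬ (0:Int) < n - 2 ^ (j - 1); omega)]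
        rw [hc0] at hspec
        simp only [specF] at hspec
        have hl : l = [] := by injection hspec with h; exact h.symm
        rw [hl]
        simp
      · have hgap : n - (2 : Int) ^ (j - 1) = (c : Int) := by omega
        rw [if_pos (by show (0:Int) < n - 2 ^ (j - 1); omega)]
        -- the whole rest of A's run is non-parity
        have hrun := specF_run data c 0 (2 ^ (j - 1) + 1) j (k + 1)
          (by intro t ht
              intro heq
              have hcast : ((2 ^ (j - 1) + 1 + t : Nat) : Int) = ((2 ^ j : Nat) : Int) :=
                congrArg (fun x : Nat => (x : Int)) heq
              push_cast at hcast
              omega)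
        rw [show c + 0 = c by omega] at hrun
        rw [hrun] at hspec
        cases htail : tailChars data (k + 1) c with
        | none => rw [htail] at hspec; simp at hspec
        | some cs =>
          rw [htail] at hspec
          simp only [specF, Option.bind, Option.map] at hspec
          have hl : l = cs ++ [] := by injection hspec with h; exact h.symm
          have hkc : k + c ≤ data.toList.length := by
            have := tailChars_le data c (k + 1) cs (by omega) htail
            omega
          have hcsval : cs = ((data.toList.drop (data.toList.length - k - c)).take c).reverse := by
            have hv := tailChars_val data c k hkc
            rw [htail] at hv
            exact Option.some.inj hv
          have hchunk := slice_chunk data k c hkc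
          simp at hchunk
          rw [hgap, hl, hcsval]
          simp [hchunk]

theorem redundBitPos_spec : Claim_equal_redundBitPos := by
  intro data r _ hpre
  unfold Spec_redundBitPos
  show redundBitPos data r = redundBitPos_alt data r
  have hl' : PySem.Str.len data = (data.length : Int) := by
    rw [PySem.Str.len_eq]; simp
  have hlen : data.toList.length = data.length := by simp
  unfold Pre_redundBitPos at hpre
  rw [hl', hlen] at hpre
  rw [show redundBitPos data r
      = (match ((PySem.List.pyRange 1 (PySem.Str.len data + r + 1) 1).foldl (stepA data)
            (0, 1, some [])).2.2 with
         | some l => String.ofList l.reverse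
         | none => "") from rfl]
  rw [show redundBitPos_alt data r
      = finishB data (PySem.Str.len data + r) (PySem.Str.len data)
          (loopB data (PySem.Str.len data + r) (PySem.Str.len data) 1 0 0 []) from rfl]
  rw [hl']
  by_cases hn : (data.length : Int) + r ≤ 0
  · rw [PySem.List.pyRange_one_eq_nil (by omega)]
    rw [loopB, if_neg (by omega)]
    apply String.toList_inj.mp
    rw [finishB_toList, if_neg (by show ¬ (0 : Int) < (data.length : Int) + r - 0; omega)]
    simp
  · set c : Nat := ((data.length : Int) + r).toNat with hcdef
    have hc1 : 1 ≤ c := by omega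
    have hcInt : (c : Int) = (data.length : Int) + r := by omega
    have hsome := specF_isSome data c 0 1 1 (by omega) (by norm_num) (by norm_num) (by omega)
      (by
        have harg : 1 + c - 1 = c := by omega
        rw [harg, hlen]
        omega)
    cases hs0 : specF data c 0 1 1 with
    | none => rw [hs0] at hsome; simp at hsome
    | some l0 =>
      have hs0' := hs0
      rw [show c = (c - 1) + 1 from by omega] at hs0'
      simp only [specF, if_pos rfl] at hs0'
      cases hs1 : specF data (c - 1) 1 1 2 with
      | none => rw [hs1] at hs0'; simp at hs0'
      | some l1 =>
        rw [hs1] at hs0'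
        simp only [Option.map] at hs0'
        have hl0 : l0 = '0' :: l1 := (Option.some.inj hs0').symm
        have hfs := foldlA_spec data c 1 0 1 []
        rw [Nat.cast_one] at hfs
        rw [show (data.length : Int) + r + 1 = (1 : Int) + ((c : Nat) : Int) from by omega,
          hfs, hs0]
        rw [loopB, if_pos ⟨by omega, by omega⟩]
        norm_num
        have hB := loopB_spec data ((data.length : Int) + r) (c - 1) 1 0 ["0"] l1
          (by omega) (by norm_num; omega) (by norm_num; omega) (by norm_num; exact hs1)
        norm_num at hB
        apply String.toList_inj.mp
        rw [hB]
        have h0 : "0".toList = ['0'] := by decide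
        simp [hl0, h0]
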